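-- pv_equiv track=rewrite | github.com/RomanMartin1/parcial2-mutantes | mutantes.py | diagonalesHaciaIzquierda
-- ===== SOURCE A (Python) =====
-- def diagonalesHaciaIzquierda(matriz):
--     filas = len(matriz)
--     columnas = len(matriz[0])
--     diagonales = []
--
--     for suma_indices in range(filas + columnas - 1):
--         if suma_indices % 2 == 0:
--             for fila in range(min(suma_indices, filas - 1), max(0, suma_indices - columnas + 1) - 1, -1):
--                 columna = suma_indices - fila
--                 diagonales.append(matriz[fila][columna])
--         else:
--             for fila in range(max(0, suma_indices - columnas + 1), min(suma_indices, filas - 1) + 1):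
--                 columna = suma_indices - fila
--                 diagonales.append(matriz[fila][columna])
--     return CuatroConsecutivos(diagonales)
--
-- def  CuatroConsecutivos(lista):
--     contador = 0
--     for i in range(len(lista) - 3):
--         if lista[i] == lista[i + 1] == lista[i + 2] == lista[i + 3]:
--             contador = contador + 1
--     return contador
-- ===== SOURCE B (Python) =====
-- def diagonalesHaciaIzquierda(matriz):
--     # Same boustrophedon anti-diagonal order, but streamed: no intermediate
--     # list, the run-of-equals counter is fused into the traversal.
--     filas, columnas = len(matriz), len(matriz[0])
--     contador = 0
--     corrida = 0
--     anterior = None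
--     for s in range(filas + columnas - 1):
--         lo = max(0, s - columnas + 1)
--         hi = min(s, filas - 1)
--         filas_diag = range(lo, hi + 1)
--         if s % 2 == 0:
--             filas_diag = reversed(filas_diag)
--         for f in filas_diag:
--             v = matriz[f][s - f]
--             corrida = corrida + 1 if anterior == v else 1
--             if corrida >= 4:
--                 contador += 1
--             anterior = v
--     return contador
-- ===== Notes on version B (the rewrite author's own statement) =====
-- stated objective: faster
-- what changed: Instead of materialising the full boustrophedon diagonal sequence in a list and then re-scanning it with an index-window helper (CuatroConsecutivos), B streams the same traversal through a fused run-length counter (previous value, current run length), counting each element that extends an equal run to length >= 4, in O(1) extra space with no intermediate list and no helper.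
import Mathlib
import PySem

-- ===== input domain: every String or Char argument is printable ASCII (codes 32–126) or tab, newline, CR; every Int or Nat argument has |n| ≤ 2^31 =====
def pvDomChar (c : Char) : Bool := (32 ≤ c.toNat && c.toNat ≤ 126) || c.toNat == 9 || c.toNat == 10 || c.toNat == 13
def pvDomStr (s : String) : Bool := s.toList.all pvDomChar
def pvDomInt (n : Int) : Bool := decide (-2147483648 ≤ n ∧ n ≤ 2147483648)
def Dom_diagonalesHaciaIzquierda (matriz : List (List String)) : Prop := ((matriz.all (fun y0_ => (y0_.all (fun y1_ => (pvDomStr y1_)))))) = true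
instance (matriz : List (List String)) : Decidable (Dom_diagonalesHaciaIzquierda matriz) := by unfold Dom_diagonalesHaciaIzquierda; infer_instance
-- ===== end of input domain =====

-- B replaces A's build-the-diagonal-list-then-rescan-windows with a single streaming
-- pass that fuses a run-length counter into the same traversal (alternative decomposition,
-- O(1) extra space). Equivalence of the RETURN value is proved on Pre_ (nonempty,
-- rectangular matrices).

-- ===== PORT A =====
-- matriz[fila][columna]; inside Pre_ every access made is in range, so the getD
-- default "" is never the value used.
def pvCell (matriz : List (List String)) (f c : Int) : String :=
  PySem.List.pyGetD (PySem.List.pyGetD matriz f []) c ""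

-- the chained comparison lista[i] == lista[i+1] == lista[i+2] == lista[i+3]
def pvP (lista : List String) (i : Int) : Bool :=
  PySem.List.pyGetD lista i "" == PySem.List.pyGetD lista (i+1) ""
    && PySem.List.pyGetD lista (i+1) "" == PySem.List.pyGetD lista (i+2) ""
    && PySem.List.pyGetD lista (i+2) "" == PySem.List.pyGetD lista (i+3) ""

def pvCuatroConsecutivos (lista : List String) : Int :=
  (PySem.List.pyRange 0 ((lista.length : Int) - 3) 1).foldl
    (fun contador i => if pvP lista i then contador + 1 else contador) 0

def diagonalesHaciaIzquierda (matriz : List (List String)) : Int :=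
  let filas : Int := matriz.length
  let columnas : Int := (matriz.headD []).length
  let diagonales :=
    (PySem.List.pyRange 0 (filas + columnas - 1) 1).foldl
      (fun acc s =>
        if s % 2 == 0 then
          (PySem.List.pyRange (min s (filas - 1)) (max 0 (s - columnas + 1) - 1) (-1)).foldl
            (fun acc2 f => acc2 ++ [pvCell matriz f (s - f)]) acc
        else
          (PySem.List.pyRange (max 0 (s - columnas + 1)) (min s (filas - 1) + 1) 1).foldl
            (fun acc2 f => acc2 ++ [pvCell matriz f (s - f)]) acc)
      []
  pvCuatroConsecutivos diagonales

-- ===== PORT B =====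
-- streaming state: (contador, corrida, anterior)
def pvStep (st : Int × Int × Option String) (v : String) : Int × Int × Option String :=
  let corrida := if st.2.2 == some v then st.2.1 + 1 else 1
  ((if 4 ≤ corrida then st.1 + 1 else st.1), corrida, some v)

def diagonalesHaciaIzquierda_alt (matriz : List (List String)) : Int :=
  let filas : Int := matriz.length
  let columnas : Int := (matriz.headD []).length
  ((PySem.List.pyRange 0 (filas + columnas - 1) 1).foldl
      (fun st s =>
        let lo := max 0 (s - columnas + 1)
        let hi := min s (filas - 1)
        let fs := if s % 2 == 0 then (PySem.List.pyRange lo (hi + 1) 1).reverse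
                  else PySem.List.pyRange lo (hi + 1) 1
        fs.foldl (fun st2 f => pvStep st2 (pvCell matriz f (s - f))) st)
      (0, 0, none)).1

-- ===== PRECONDITION & SPEC =====
-- Pre_ excludes exactly the inputs where A raises IndexError: the empty matrix
-- (matriz[0]) and matrices with a row shorter than row 0 (the traversal visits every
-- cell of the len(matriz) x len(matriz[0]) grid, so such a row is always hit).
def Pre_diagonalesHaciaIzquierda (matriz : List (List String)) : Prop :=
  matriz ≠ [] ∧ ∀ row ∈ matriz, (matriz.headD []).length ≤ row.length
instance (matriz : List (List String)) : Decidable (Pre_diagonalesHaciaIzquierda matriz) := by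
  unfold Pre_diagonalesHaciaIzquierda; infer_instance

def pvWitness_diagonalesHaciaIzquierda : List (List String) :=
  [["a", "a"], ["a", "a"]]

def Spec_diagonalesHaciaIzquierda (matriz : List (List String)) (out : Int) : Prop := out = diagonalesHaciaIzquierda_alt matriz
instance (matriz : List (List String)) (out : Int) : Decidable (Spec_diagonalesHaciaIzquierda matriz out) := by unfold Spec_diagonalesHaciaIzquierda; infer_instance

-- ===== CLAIM (what is proved, stated in full; the proofs are below) =====
def Claim_equal_diagonalesHaciaIzquierda : Prop := ∀ (matriz : List (List String)), Dom_diagonalesHaciaIzquierda matriz → Pre_diagonalesHaciaIzquierda matriz → Spec_diagonalesHaciaIzquierda matriz (diagonalesHaciaIzquierda matriz)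

-- ===== LEMMAS AND PROOFS =====

-- the cells of anti-diagonal s, in the (boustrophedon) order both programs visit them
def pvSeg (matriz : List (List String)) (s : Int) : List String :=
  let filas : Int := matriz.length
  let columnas : Int := (matriz.headD []).length
  let lo := max 0 (s - columnas + 1)
  let hi := min s (filas - 1)
  (if s % 2 == 0 then (PySem.List.pyRange lo (hi + 1) 1).reverse
   else PySem.List.pyRange lo (hi + 1) 1).map (fun f => pvCell matriz f (s - f))

-- head-recursive window count (clean spec both sides are reduced to)
def pvW : List String → Int
  | [] => 0
  | [_] => 0
  | [_, _] => 0
  | [_, _, _] => 0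
  | a :: b :: c :: d :: t => (if a == b && b == c && c == d then 1 else 0) + pvW (b :: c :: d :: t)
termination_by l => l.length
decreasing_by simp

-- B's counter, with the initial contador dropped
def pvG (r : Int) (a : Option String) : List String → Int
  | [] => 0
  | v :: t =>
      (if 4 ≤ (if a == some v then r + 1 else 1) then 1 else 0)
        + pvG (if a == some v then r + 1 else 1) (some v) t

theorem pvW_short (l : List String) (h : l.length ≤ 3) : pvW l = 0 := by
  match l with
  | [] => simp [pvW]
  | [_] => simp [pvW]
  | [_, _] => simp [pvW]
  | [_, _, _] => simp [pvW]
  | _ :: _ :: _ :: _ :: _ => simp at h; omega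

theorem pvW_break1 (a v : String) (t : List String) (h : (a == v) = false) :
    pvW (a :: v :: t) = pvW (v :: t) := by
  match t with
  | [] => simp [pvW]
  | [_] => simp [pvW]
  | w :: x :: t' => simp [pvW, h]

theorem pvW_break2 (a v : String) (t : List String) (h : (a == v) = false) :
    pvW (a :: a :: v :: t) = pvW (v :: t) := by
  match t with
  | [] => simp [pvW]
  | w :: t' => simp [pvW, h, pvW_break1 a v (w :: t') h]

theorem pvW_break3 (a v : String) (t : List String) (h : (a == v) = false) :
    pvW (a :: a :: a :: v :: t) = pvW (v :: t) := by
  simp [pvW, h, pvW_break2 a v t h]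

theorem pvG_eq_pvW (l : List String) : ∀ (r : Int) (a : String), 1 ≤ r →
    pvG r (some a) l = pvW (List.replicate (min r 3).toNat a ++ l) := by
  induction l with
  | nil =>
      intro r a hr
      simp [pvG]
      exact (pvW_short _ (by simp)).symm
  | cons v t ih =>
      intro r a hr
      by_cases hv : a = v
      · subst hv
        simp only [pvG, beq_self_eq_true, if_true]
        by_cases h3 : 3 ≤ r
        · have hm : (min r 3).toNat = 3 := by omega
          have hm' : (min (r + 1) 3).toNat = 3 := by omega
          have h4 : 4 ≤ r + 1 := by omega
          rw [if_pos h4, hm, ih (r + 1) a (by omega), hm']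
          simp [List.replicate_succ, pvW]
        · have h4 : ¬ 4 ≤ r + 1 := by omega
          rw [if_neg h4, ih (r + 1) a (by omega)]
          have hm : (min r 3).toNat + 1 = (min (r + 1) 3).toNat := by omega
          rw [← hm]
          simp [List.replicate_succ']
      · have hbeq : (a == v) = false := beq_eq_false_iff_ne.mpr hv
        simp only [pvG, Option.some_beq_some, hbeq, Bool.false_eq_true, if_false]
        have h4 : ¬ (4 : Int) ≤ 1 := by omega
        rw [if_neg h4, ih 1 v (by omega)]
        have h1 : (min (1:Int) 3).toNat = 1 := by omega
        rw [h1]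
        simp only [List.replicate_one, List.singleton_append, zero_add]
        have : (min r 3).toNat = 1 ∨ (min r 3).toNat = 2 ∨ (min r 3).toNat = 3 := by omega
        rcases this with h | h | h <;> rw [h] <;>
          simp [List.replicate_succ, pvW_break1 a v t hbeq, pvW_break2 a v t hbeq,
                pvW_break3 a v t hbeq]

theorem foldl_pvStep (l : List String) : ∀ (c r : Int) (a : Option String),
    (l.foldl pvStep (c, r, a)).1 = c + pvG r a l := by
  induction l with
  | nil => intro c r a; simp [pvG]
  | cons v t ih =>
      intro c r a
      simp only [List.foldl_cons, pvStep, pvG, ih]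
      split_ifs <;> ring

theorem stream_eq_pvW (l : List String) : (l.foldl pvStep (0, 0, none)).1 = pvW l := by
  match l with
  | [] => simp [pvW]
  | v :: t =>
      rw [foldl_pvStep]
      have : pvG 0 none (v :: t) = pvG 1 (some v) t := by
        simp [pvG]
      rw [this, pvG_eq_pvW t 1 v (by omega)]
      simp

theorem pyGetD_cons_shift (a : String) (tl : List String) (i : Int) (h : 0 ≤ i) :
    PySem.List.pyGetD (a :: tl) (i + 1) "" = PySem.List.pyGetD tl i "" := by
  obtain ⟨k, rfl⟩ : ∃ k : Nat, i = (k : Int) := ⟨i.toNat, by omega⟩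
  rw [show (k : Int) + 1 = ((k + 1 : Nat) : Int) from by push_cast; ring,
      PySem.List.pyGetD_natCast, PySem.List.pyGetD_natCast]
  simp [List.getD]

theorem pvP_shift (a : String) (tl : List String) (k : Nat) :
    pvP (a :: tl) ((k : Int) + 1) = pvP tl (k : Int) := by
  simp only [pvP]
  rw [show (k : Int) + 1 + 2 = ((k : Int) + 2) + 1 from by ring,
      show (k : Int) + 1 + 3 = ((k : Int) + 3) + 1 from by ring]
  rw [pyGetD_cons_shift a tl k (by positivity),
      pyGetD_cons_shift a tl ((k : Int) + 1) (by positivity),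
      pyGetD_cons_shift a tl ((k : Int) + 2) (by positivity),
      pyGetD_cons_shift a tl ((k : Int) + 3) (by positivity)]

theorem cuatro_eq_countP (l : List String) :
    pvCuatroConsecutivos l
      = ((List.range (l.length - 3)).countP (fun k : Nat => pvP l (k : Int)) : Int) := by
  unfold pvCuatroConsecutivos
  rw [PySem.List.foldl_if_add_one (p := pvP l)]
  by_cases h : 3 ≤ l.length
  · rw [show (l.length : Int) - 3 = ((l.length - 3 : Nat) : Int) from by omega,
        PySem.List.pyRange_zero_natCast, List.countP_map]
    simp [Function.comp_def]
  · rw [PySem.List.pyRange_one_eq_nil (by omega)]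
    have : l.length - 3 = 0 := by omega
    rw [this]
    simp

theorem pvP_zero (a b c d : String) (t : List String) :
    pvP (a :: b :: c :: d :: t) 0 = (a == b && b == c && c == d) := by
  simp only [pvP, show (0 : Int) + 1 = 1 from by ring, show (0 : Int) + 2 = 2 from by ring,
    show (0 : Int) + 3 = 3 from by ring, PySem.List.pyGetD_ofNat']
  simp [List.getD]

theorem cuatro_eq_pvW (l : List String) : pvCuatroConsecutivos l = pvW l := by
  match l with
  | [] => rw [cuatro_eq_countP]; simp [pvW]
  | [x] => rw [cuatro_eq_countP]; simp [pvW]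
  | [x, y] => rw [cuatro_eq_countP]; simp [pvW]
  | [x, y, z] => rw [cuatro_eq_countP]; simp [pvW]
  | a :: b :: c :: d :: t =>
      rw [cuatro_eq_countP]
      have hlen : (a :: b :: c :: d :: t).length - 3 = t.length + 1 := by simp
      rw [hlen, List.range_succ_eq_map, List.countP_cons, List.countP_map]
      have htail : (List.range t.length).countP
            ((fun k : Nat => pvP (a :: b :: c :: d :: t) (k : Int)) ∘ Nat.succ)
          = (List.range t.length).countP (fun k : Nat => pvP (b :: c :: d :: t) (k : Int)) := by
        apply List.countP_congr
        intro k _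
        have : ((Nat.succ k : Nat) : Int) = (k : Int) + 1 := by push_cast; ring
        simp only [Function.comp_apply, this, pvP_shift a (b :: c :: d :: t) k]
      rw [htail]
      have hrec := cuatro_eq_pvW (b :: c :: d :: t)
      rw [cuatro_eq_countP] at hrec
      have hb : (b :: c :: d :: t).length - 3 = t.length := by simp
      rw [hb] at hrec
      rw [show pvW (a :: b :: c :: d :: t)
            = (if a == b && b == c && c == d then 1 else 0) + pvW (b :: c :: d :: t) from by
          simp [pvW]]
      rw [← hrec]
      simp only [Nat.cast_zero]
      rw [pvP_zero]
      split_ifs <;> push_cast <;> ring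
termination_by l.length
decreasing_by simp

theorem foldl_flatMap_eq {α β σ : Type} (f : σ → β → σ) (g : α → List β) (L : List α) :
    ∀ st : σ, (L.flatMap g).foldl f st = L.foldl (fun st s => (g s).foldl f st) st := by
  induction L with
  | nil => intro st; simp
  | cons x L ih => intro st; simp [List.flatMap_cons, List.foldl_append, ih]

theorem portA_eq (matriz : List (List String)) :
    diagonalesHaciaIzquierda matriz
      = pvCuatroConsecutivos
          ((PySem.List.pyRange 0 ((matriz.length : Int) + ((matriz.headD []).length : Int) - 1) 1).flatMap
            (pvSeg matriz)) := by
  simp only [diagonalesHaciaIzquierda]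
  congr 1
  refine Eq.trans
    (PySem.List.foldl_congr_mem _ _ (fun acc s => acc ++ pvSeg matriz s) _ ?_) ?_
  · intro acc s _
    simp only [pvSeg]
    by_cases hev : (s % 2 == 0) = true
    · rw [if_pos hev, if_pos hev, PySem.List.foldl_append_singleton_eq_map,
          PySem.List.pyRange_neg_one_eq_reverse,
          show max 0 (s - ((matriz.headD []).length : Int) + 1) - 1 + 1
              = max 0 (s - ((matriz.headD []).length : Int) + 1) from by ring]
    · rw [if_neg hev, if_neg hev, PySem.List.foldl_append_singleton_eq_map]
  · rw [PySem.List.foldl_append_eq_flatMap]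
    simp

theorem portB_eq (matriz : List (List String)) :
    diagonalesHaciaIzquierda_alt matriz
      = (((PySem.List.pyRange 0 ((matriz.length : Int) + ((matriz.headD []).length : Int) - 1) 1).flatMap
            (pvSeg matriz)).foldl pvStep (0, 0, none)).1 := by
  simp only [diagonalesHaciaIzquierda_alt]
  rw [foldl_flatMap_eq]
  congr 1
  apply PySem.List.foldl_congr_mem
  intro st s _
  simp only [pvSeg]
  rw [List.foldl_map]

-- ===== VERDICT (by name: the statement is the Claim_ definition above) =====
theorem diagonalesHaciaIzquierda_spec : Claim_equal_diagonalesHaciaIzquierda := by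
  intro matriz _ _
  unfold Spec_diagonalesHaciaIzquierda
  rw [portA_eq, portB_eq, stream_eq_pvW, cuatro_eq_pvW]
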